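-- pv_equiv track=rewrite | github.com/IamDeGus/AOIS | lab2/src/minimization/karnaugh.py | _covers_to_pattern
-- ===== SOURCE A (Python) =====
-- def _covers_to_pattern(covers: tuple[int, ...], variables_count: int) -> str:
--     if variables_count == 0:
--         return ""
--     if not covers:
--         return "-" * variables_count
--
--     chars: list[str] = []
--     for bit_index in range(variables_count):
--         bit_mask = 1 << (variables_count - 1 - bit_index)
--         bit_values = {(cover & bit_mask) >> (variables_count - 1 - bit_index) for cover in covers}
--         if len(bit_values) == 1:
--             chars.append(str(next(iter(bit_values))))
--         else:
--             chars.append("-")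
--     return "".join(chars)
-- ===== SOURCE B (Python) =====
-- def _covers_to_pattern(covers, variables_count):
--     if variables_count <= 0:
--         return ""
--     if not covers:
--         return "-" * variables_count
--     acc_and = -1
--     acc_or = 0
--     for cover in covers:
--         acc_and &= cover
--         acc_or |= cover
--     chars = []
--     for bit_index in range(variables_count):
--         shift = variables_count - 1 - bit_index
--         if (acc_and >> shift) & 1:
--             chars.append("1")
--         elif not ((acc_or >> shift) & 1):
--             chars.append("0")
--         else:
--             chars.append("-")
--     return "".join(chars)
-- ===== Notes on version B (the rewrite author's own statement) =====
-- stated objective: faster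
-- what changed: Instead of building a set of extracted bit values per position (scanning all covers for every bit), B folds all covers once into a single AND-accumulator and a single OR-accumulator and then decides each character by comparing one bit of each accumulator.
import Mathlib
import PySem

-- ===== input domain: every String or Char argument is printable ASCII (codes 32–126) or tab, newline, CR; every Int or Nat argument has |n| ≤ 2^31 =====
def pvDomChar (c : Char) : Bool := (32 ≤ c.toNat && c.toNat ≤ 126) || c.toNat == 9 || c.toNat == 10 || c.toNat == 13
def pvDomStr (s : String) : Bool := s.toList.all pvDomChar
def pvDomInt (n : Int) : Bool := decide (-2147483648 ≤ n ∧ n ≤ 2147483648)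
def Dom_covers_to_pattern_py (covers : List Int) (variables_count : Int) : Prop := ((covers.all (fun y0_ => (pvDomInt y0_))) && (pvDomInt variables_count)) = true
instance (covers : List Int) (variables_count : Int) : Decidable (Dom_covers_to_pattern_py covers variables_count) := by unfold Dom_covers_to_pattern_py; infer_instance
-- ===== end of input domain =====

-- B replaces A's per-bit set of extracted bit values (one scan of the covers per bit)
-- by one AND-fold and one OR-fold over the covers followed by a per-bit compare.


-- ===== PORT A =====
def covers_to_pattern_py (covers : List Int) (variables_count : Int) : String :=
  if variables_count = 0 then "" else
  if covers = [] then String.mk (List.replicate variables_count.toNat '-') else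
  let chars : List (List Char) := (PySem.List.pyRange 0 variables_count 1).foldl
    (fun chars bit_index =>
      if (PySem.Set.ofList (covers.map (fun cover =>
            (PySem.Int.band cover (1 <<< (variables_count - 1 - bit_index).toNat)) >>>
              (variables_count - 1 - bit_index).toNat))).length = 1 then
        chars ++ [PySem.Int.toChars ((PySem.Set.ofList (covers.map (fun cover =>
            (PySem.Int.band cover (1 <<< (variables_count - 1 - bit_index).toNat)) >>>
              (variables_count - 1 - bit_index).toNat))).headD 0)]
      else
        chars ++ [['-']]) []
  String.mk chars.flatten

-- ===== PORT B =====
def covers_to_pattern_py_alt (covers : List Int) (variables_count : Int) : String :=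
  if variables_count ≤ 0 then "" else
  if covers = [] then String.mk (List.replicate variables_count.toNat '-') else
  let accAnd : Int := covers.foldl PySem.Int.band (-1)
  let accOr : Int := covers.foldl PySem.Int.bor 0
  let chars : List Char := (PySem.List.pyRange 0 variables_count 1).foldl
    (fun chars bit_index =>
      chars ++ [if PySem.Int.band (accAnd >>> (variables_count - 1 - bit_index).toNat) 1 ≠ 0 then '1'
                else if PySem.Int.band (accOr >>> (variables_count - 1 - bit_index).toNat) 1 = 0 then '0'
                else '-']) []
  String.mk chars

-- ===== PRECONDITION & SPEC =====
def Spec_covers_to_pattern_py (covers : List Int) (variables_count : Int) (out : String) : Prop := out = covers_to_pattern_py_alt covers variables_count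
instance (covers : List Int) (variables_count : Int) (out : String) : Decidable (Spec_covers_to_pattern_py covers variables_count out) := by unfold Spec_covers_to_pattern_py; infer_instance

-- ===== CLAIM (what is proved, stated in full; the proofs are below) =====
def Claim_equal_covers_to_pattern_py : Prop := ∀ (covers : List Int) (variables_count : Int), Dom_covers_to_pattern_py covers variables_count → Spec_covers_to_pattern_py covers variables_count (covers_to_pattern_py covers variables_count)

-- ===== LEMMAS AND PROOFS =====

lemma pv_shr1_land (m n : Nat) : (m &&& n) >>> 1 = (m >>> 1) &&& (n >>> 1) := by
  apply Nat.eq_of_testBit_eq; intro i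
  simp [Nat.testBit_shiftRight]

lemma pv_shr1_ldiff (m n : Nat) : (m.ldiff n) >>> 1 = (m >>> 1).ldiff (n >>> 1) := by
  apply Nat.eq_of_testBit_eq; intro i
  simp [Nat.testBit_shiftRight, Nat.testBit_ldiff]

lemma pv_mod2_land (m n : Nat) : (m &&& n) % 2 = 1 ↔ (m % 2 = 1 ∧ n % 2 = 1) := by
  have h := Nat.testBit_land m n 0
  simpa [Nat.testBit_zero, ← Bool.decide_and, decide_eq_decide] using h

lemma pv_mod2_ldiff (m n : Nat) : (m.ldiff n) % 2 = 1 ↔ (m % 2 = 1 ∧ ¬ n % 2 = 1) := by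
  have h := Nat.testBit_ldiff m n 0
  simpa [Nat.testBit_zero, ← decide_not, ← Bool.decide_and, decide_eq_decide] using h

lemma pv_natL (m n : Nat) : m - (m &&& n) = m.ldiff n := by
  induction m using Nat.strong_induction_on generalizing n with
  | _ m ih =>
    match m with
    | 0 =>
      have h0 : Nat.ldiff 0 n = 0 :=
        Nat.eq_of_testBit_eq (by simp [Nat.testBit_ldiff, Nat.zero_testBit])
      simp [h0]
    | (m + 1) =>
      have hlt : (m + 1) >>> 1 < m + 1 := by
        simp [Nat.shiftRight_one]; omega
      have ih2 := ih ((m + 1) >>> 1) hlt (n >>> 1)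
      rw [← pv_shr1_land, ← pv_shr1_ldiff] at ih2
      have hA1 : ((m + 1) &&& n) ≤ m + 1 := Nat.and_le_left
      have hA2 : (((m + 1) &&& n) >>> 1) ≤ ((m + 1) >>> 1) := by
        rw [pv_shr1_land]; exact Nat.and_le_left
      have d1 := pv_mod2_land (m + 1) n
      have d2 := pv_mod2_ldiff (m + 1) n
      simp only [Nat.shiftRight_one] at ih2 hA2 hlt
      omega

lemma pv_negSucc_lit (x : Nat) : -(x : Int) - 1 = Int.negSucc x := by
  rw [Int.negSucc_eq]; ring

lemma pv_negSucc_inv (m : Nat) : (-(Int.negSucc m) - 1).toNat = m := by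
  simp [Int.negSucc_eq]

lemma pv_toNat_ofNat (x : Nat) : (Int.ofNat x).toNat = x := rfl

lemma pv_toNat_cast (x : Nat) : ((x : Int)).toNat = x := rfl

lemma pv_tb_ofNat (x k : Nat) : (Int.ofNat x).testBit k = x.testBit k := rfl

lemma pv_tb_cast (x k : Nat) : ((x : Int)).testBit k = x.testBit k := rfl

lemma pv_tb_negSucc (x k : Nat) : (Int.negSucc x).testBit k = !(x.testBit k) := rfl

lemma pv_nonneg_ofNat (m : Nat) : (0 : Int) ≤ Int.ofNat m :=
  Int.ofNat_le.mpr (Nat.zero_le m)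

lemma pv_neg_negSucc (m : Nat) : ¬ (0 : Int) ≤ Int.negSucc m := by
  rw [Int.negSucc_eq]; omega

lemma pv_tb_band (a b : Int) (k : Nat) :
    (PySem.Int.band a b).testBit k = (a.testBit k && b.testBit k) := by
  cases a with
  | ofNat m =>
    cases b with
    | ofNat n =>
      simp only [PySem.Int.band, if_pos (pv_nonneg_ofNat m), if_pos (pv_nonneg_ofNat n),
        pv_toNat_ofNat, pv_tb_cast, pv_tb_ofNat, Nat.testBit_land]
    | negSucc n =>
      simp only [PySem.Int.band, if_pos (pv_nonneg_ofNat m), if_neg (pv_neg_negSucc n),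
        pv_negSucc_inv, pv_toNat_ofNat]
      rw [pv_natL]
      simp only [pv_tb_cast, pv_tb_ofNat, pv_tb_negSucc, Nat.testBit_ldiff]
  | negSucc m =>
    cases b with
    | ofNat n =>
      simp only [PySem.Int.band, if_neg (pv_neg_negSucc m), if_pos (pv_nonneg_ofNat n),
        pv_negSucc_inv, pv_toNat_ofNat]
      rw [pv_natL]
      simp only [pv_tb_cast, pv_tb_ofNat, pv_tb_negSucc, Nat.testBit_ldiff]
      cases m.testBit k <;> cases n.testBit k <;> rfl
    | negSucc n =>
      simp only [PySem.Int.band, if_neg (pv_neg_negSucc m), if_neg (pv_neg_negSucc n),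
        pv_negSucc_inv]
      rw [pv_negSucc_lit]
      simp only [pv_tb_negSucc, Nat.testBit_lor]
      cases m.testBit k <;> cases n.testBit k <;> rfl

lemma pv_tb_bor (a b : Int) (k : Nat) :
    (PySem.Int.bor a b).testBit k = (a.testBit k || b.testBit k) := by
  cases a with
  | ofNat m =>
    cases b with
    | ofNat n =>
      simp only [PySem.Int.bor, if_pos (pv_nonneg_ofNat m), if_pos (pv_nonneg_ofNat n),
        pv_toNat_ofNat, pv_tb_cast, pv_tb_ofNat, Nat.testBit_lor]
    | negSucc n =>
      simp only [PySem.Int.bor, if_pos (pv_nonneg_ofNat m), if_neg (pv_neg_negSucc n),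
        pv_negSucc_inv, pv_toNat_ofNat]
      rw [pv_natL, pv_negSucc_lit]
      simp only [pv_tb_negSucc, pv_tb_ofNat, Nat.testBit_ldiff]
      cases m.testBit k <;> cases n.testBit k <;> rfl
  | negSucc m =>
    cases b with
    | ofNat n =>
      simp only [PySem.Int.bor, if_neg (pv_neg_negSucc m), if_pos (pv_nonneg_ofNat n),
        pv_negSucc_inv, pv_toNat_ofNat]
      rw [pv_natL, pv_negSucc_lit]
      simp only [pv_tb_negSucc, pv_tb_ofNat, Nat.testBit_ldiff]
      cases m.testBit k <;> cases n.testBit k <;> rfl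
    | negSucc n =>
      simp only [PySem.Int.bor, if_neg (pv_neg_negSucc m), if_neg (pv_neg_negSucc n),
        pv_negSucc_inv]
      rw [pv_negSucc_lit]
      simp only [pv_tb_negSucc, Nat.testBit_land]
      cases m.testBit k <;> cases n.testBit k <;> rfl

lemma pv_shr_testBit (x : Int) (s k : Nat) : (x >>> s).testBit k = x.testBit (s + k) := by
  cases x with
  | ofNat m =>
    rw [show Int.ofNat m >>> s = Int.ofNat (m >>> s) from rfl, pv_tb_ofNat, pv_tb_ofNat,
      Nat.testBit_shiftRight]
  | negSucc m =>
    rw [show Int.negSucc m >>> s = Int.negSucc (m >>> s) from rfl, pv_tb_negSucc, pv_tb_negSucc,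
      Nat.testBit_shiftRight]

lemma pv_tb_neg_one (s : Nat) : (-1 : Int).testBit s = true := by
  rw [show (-1 : Int) = Int.negSucc 0 from rfl, pv_tb_negSucc, Nat.zero_testBit]
  rfl

lemma pv_tb_zero (s : Nat) : (0 : Int).testBit s = false := by
  rw [show (0 : Int) = Int.ofNat 0 from rfl, pv_tb_ofNat, Nat.zero_testBit]

-- A's per-cover bit extraction equals the testBit of the cover.
lemma pv_EA (c : Int) (s : Nat) :
    (PySem.Int.band c (1 <<< s)) >>> s = if c.testBit s then 1 else 0 := by
  rw [show (1 : Nat) <<< s = 2 ^ s by rw [Nat.shiftLeft_eq]; ring]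
  cases c with
  | ofNat m =>
    simp only [PySem.Int.band, if_pos (pv_nonneg_ofNat m),
      if_pos (show (0:Int) ≤ ((2^s : Nat) : Int) from Int.natCast_nonneg _),
      pv_toNat_ofNat, pv_toNat_cast]
    rw [Nat.and_two_pow]
    have hshr : ∀ t : Nat, (((t * 2^s : Nat)) : Int) >>> s = (((t * 2^s) >>> s : Nat) : Int) := fun _ => rfl
    rw [hshr, Nat.shiftRight_eq_div_pow, Nat.mul_div_cancel _ (Nat.two_pow_pos s)]
    cases hb : m.testBit s <;> simp [pv_tb_ofNat, pv_tb_cast, hb]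
  | negSucc m =>
    simp only [PySem.Int.band, if_neg (pv_neg_negSucc m),
      if_pos (show (0:Int) ≤ ((2^s : Nat) : Int) from Int.natCast_nonneg _),
      pv_negSucc_inv, pv_toNat_cast]
    rw [Nat.two_pow_and]
    have hshr : ∀ t : Nat, (((2^s - 2^s * t : Nat)) : Int) >>> s = (((2^s - 2^s * t) >>> s : Nat) : Int) := fun _ => rfl
    rw [hshr]
    cases hb : m.testBit s
    · simp only [hb, Bool.toNat_false, Nat.mul_zero, Nat.sub_zero, Nat.shiftRight_eq_div_pow,
        Nat.div_self (Nat.two_pow_pos s)]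
      rw [pv_tb_negSucc, hb]
      rfl
    · simp only [hb, Bool.toNat_true, Nat.mul_one, Nat.sub_self, Nat.zero_shiftRight]
      rw [pv_tb_negSucc, hb]
      rfl

-- B's low-bit mask equals the testBit of the value.
lemma pv_EB (x : Int) : PySem.Int.band x 1 = if x.testBit 0 then 1 else 0 := by
  cases x with
  | ofNat m =>
    simp only [PySem.Int.band, if_pos (pv_nonneg_ofNat m),
      if_pos (show (0:Int) ≤ 1 by omega), pv_toNat_ofNat]
    have h1 : (1 : Int).toNat = 1 := rfl
    rw [h1, Nat.and_one_is_mod]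
    rcases Nat.mod_two_eq_zero_or_one m with h | h <;>
      simp [pv_tb_ofNat, pv_tb_cast, Nat.testBit_zero, h]
  | negSucc m =>
    simp only [PySem.Int.band, if_neg (pv_neg_negSucc m),
      if_pos (show (0:Int) ≤ 1 by omega), pv_negSucc_inv]
    have h1 : (1 : Int).toNat = 1 := rfl
    rw [h1, Nat.and_comm, Nat.and_one_is_mod]
    rcases Nat.mod_two_eq_zero_or_one m with h | h <;>
      simp [pv_tb_negSucc, Nat.testBit_zero, h]

lemma pv_fold_band (covers : List Int) (a : Int) (s : Nat) :
    (covers.foldl PySem.Int.band a).testBit s = (a.testBit s && covers.all (fun c => c.testBit s)) := by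
  induction covers generalizing a with
  | nil => simp
  | cons c t ih => simp [List.foldl_cons, ih, pv_tb_band, Bool.and_assoc]

lemma pv_fold_bor (covers : List Int) (a : Int) (s : Nat) :
    (covers.foldl PySem.Int.bor a).testBit s = (a.testBit s || covers.any (fun c => c.testBit s)) := by
  induction covers generalizing a with
  | nil => simp
  | cons c t ih => simp [List.foldl_cons, ih, pv_tb_bor, Bool.or_assoc]

lemma pv_set_aux (v : Int) (l : List Int) (h : ∀ x ∈ l, x = v) :
    List.foldl PySem.Set.add [v] l = [v] := by
  induction l with
  | nil => rfl
  | cons x t ih =>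
    have hx : x = v := h x (by simp)
    subst hx
    have hadd : PySem.Set.add [x] x = [x] := by simp [PySem.Set.add]
    rw [List.foldl_cons, hadd]
    exact ih (fun y hy => h y (by simp [hy]))

lemma pv_set_const (l : List Int) (v : Int) (hne : l ≠ []) (h : ∀ x ∈ l, x = v) :
    PySem.Set.ofList l = [v] := by
  cases l with
  | nil => exact absurd rfl hne
  | cons x t =>
    have hx : x = v := h x (by simp)
    subst hx
    have hadd : PySem.Set.add PySem.Set.empty x = [x] := by
      simp [PySem.Set.add, PySem.Set.empty]
    show List.foldl PySem.Set.add PySem.Set.empty (x :: t) = [x]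
    rw [List.foldl_cons, hadd]
    exact pv_set_aux x t (fun y hy => h y (by simp [hy]))

-- the per-bit character produced by A equals (as a singleton) the one produced by B
lemma pv_perbit (covers : List Int) (hne : covers ≠ []) (s : Nat) :
    (if (PySem.Set.ofList (covers.map (fun cover =>
          (PySem.Int.band cover (1 <<< s)) >>> s))).length = 1 then
       PySem.Int.toChars ((PySem.Set.ofList (covers.map (fun cover =>
          (PySem.Int.band cover (1 <<< s)) >>> s))).headD 0)
     else ['-'])
    = [if PySem.Int.band ((covers.foldl PySem.Int.band (-1)) >>> s) 1 ≠ 0 then '1'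
       else if PySem.Int.band ((covers.foldl PySem.Int.bor 0) >>> s) 1 = 0 then '0'
       else '-'] := by
  have hmap : covers.map (fun cover => (PySem.Int.band cover (1 <<< s)) >>> s)
      = covers.map (fun cover => if cover.testBit s then (1:Int) else 0) :=
    List.map_congr_left (fun c _ => pv_EA c s)
  have hA : PySem.Int.band ((covers.foldl PySem.Int.band (-1)) >>> s) 1
      = if covers.all (fun c => c.testBit s) then 1 else 0 := by
    rw [pv_EB, pv_shr_testBit, Nat.add_zero, pv_fold_band, pv_tb_neg_one, Bool.true_and]
  have hO : PySem.Int.band ((covers.foldl PySem.Int.bor 0) >>> s) 1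
      = if covers.any (fun c => c.testBit s) then 1 else 0 := by
    rw [pv_EB, pv_shr_testBit, Nat.add_zero, pv_fold_bor, pv_tb_zero, Bool.false_or]
  rw [hmap, hA, hO]
  by_cases hall : (covers.all (fun c => c.testBit s)) = true
  · have hset : PySem.Set.ofList (covers.map (fun cover => if cover.testBit s then (1:Int) else 0)) = [1] := by
      apply pv_set_const _ _ (by simpa using hne)
      intro x hx
      obtain ⟨c, hc, rfl⟩ := List.mem_map.mp hx
      simp [List.all_eq_true.mp hall c hc]
    rw [hset, hall]
    norm_num
    decide
  · have hallf : (covers.all (fun c => c.testBit s)) = false := by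
      cases hb : (covers.all (fun c => c.testBit s)) with
      | false => rfl
      | true => exact absurd hb hall
    by_cases hany : (covers.any (fun c => c.testBit s)) = true
    · obtain ⟨c1, hc1, hb1⟩ := List.any_eq_true.mp hany
      obtain ⟨c0, hc0, hb0'⟩ := List.all_eq_false.mp hallf
      have hb0 : c0.testBit s = false := by simpa using hb0'
      have h0 : (0:Int) ∈ PySem.Set.ofList (covers.map (fun cover => if cover.testBit s then (1:Int) else 0)) := by
        rw [PySem.Set.mem_ofList]
        exact List.mem_map.mpr ⟨c0, hc0, by simp [hb0]⟩
      have h1 : (1:Int) ∈ PySem.Set.ofList (covers.map (fun cover => if cover.testBit s then (1:Int) else 0)) := by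
        rw [PySem.Set.mem_ofList]
        exact List.mem_map.mpr ⟨c1, hc1, by simp [hb1]⟩
      have hlen : ¬ (PySem.Set.ofList (covers.map (fun cover => if cover.testBit s then (1:Int) else 0))).length = 1 := by
        intro hl
        obtain ⟨a, ha⟩ := List.length_eq_one_iff.mp hl
        rw [ha] at h0 h1
        simp at h0 h1
        omega
      rw [if_neg hlen, hallf, hany]
      norm_num
    · have hanyf : (covers.any (fun c => c.testBit s)) = false := by
        cases hb : (covers.any (fun c => c.testBit s)) with
        | false => rfl
        | true => exact absurd hb hany
      have hset : PySem.Set.ofList (covers.map (fun cover => if cover.testBit s then (1:Int) else 0)) = [0] := by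
        apply pv_set_const _ _ (by simpa using hne)
        intro x hx
        obtain ⟨c, hc, rfl⟩ := List.mem_map.mp hx
        have hf : c.testBit s = false := by
          cases hb : c.testBit s with
          | false => rfl
          | true => exact absurd (List.any_eq_true.mpr ⟨c, hc, by simp [hb]⟩) hany
        simp [hf]
      rw [hset, hallf, hanyf]
      norm_num
      decide

lemma pv_assemble {γ : Type} (L : List γ) (gA : γ → List Char) (fB : γ → Char)
    (h : ∀ x ∈ L, gA x = [fB x]) :
    (List.map gA L).flatten = List.map fB L := by
  induction L with
  | nil => rfl
  | cons x t ih =>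
    simp only [List.map_cons, List.flatten_cons, h x (by simp)]
    rw [ih (fun y hy => h y (by simp [hy]))]
    rfl

-- ===== VERDICT (by name: the statement is the Claim_ definition above) =====
theorem covers_to_pattern_py_spec : Claim_equal_covers_to_pattern_py := by
  intro covers vc _hdom
  unfold Spec_covers_to_pattern_py covers_to_pattern_py covers_to_pattern_py_alt
  by_cases h0 : vc = 0
  · subst h0; simp
  · rw [if_neg h0]
    by_cases hc : covers = []
    · subst hc
      rw [if_pos rfl]
      by_cases hneg : vc ≤ 0
      · rw [if_pos hneg]
        have h : vc.toNat = 0 := by omega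
        rw [h]
        rfl
      · rw [if_neg hneg, if_pos rfl]
    · rw [if_neg hc]
      by_cases hneg : vc ≤ 0
      · rw [if_pos hneg]
        have hr : PySem.List.pyRange 0 vc 1 = [] := by
          rw [PySem.List.pyRange_of_pos _ _ (by omega : (0:Int) < 1)]
          rw [if_neg (by omega : ¬ (0:Int) < vc)]
          rfl
        rw [hr]
        rfl
      · rw [if_neg hneg, if_neg hc]
        simp only []
        have hbodyA : (fun (chars : List (List Char)) (bit_index : Int) =>
            if (PySem.Set.ofList (covers.map (fun cover =>
                  (PySem.Int.band cover (1 <<< (vc - 1 - bit_index).toNat)) >>>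
                    (vc - 1 - bit_index).toNat))).length = 1 then
              chars ++ [PySem.Int.toChars ((PySem.Set.ofList (covers.map (fun cover =>
                  (PySem.Int.band cover (1 <<< (vc - 1 - bit_index).toNat)) >>>
                    (vc - 1 - bit_index).toNat))).headD 0)]
            else chars ++ [['-']])
            = (fun chars bit_index => chars ++
                [if (PySem.Set.ofList (covers.map (fun cover =>
                      (PySem.Int.band cover (1 <<< (vc - 1 - bit_index).toNat)) >>>
                        (vc - 1 - bit_index).toNat))).length = 1 then
                   PySem.Int.toChars ((PySem.Set.ofList (covers.map (fun cover =>
                      (PySem.Int.band cover (1 <<< (vc - 1 - bit_index).toNat)) >>>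
                        (vc - 1 - bit_index).toNat))).headD 0)
                 else ['-']]) := by
          funext chars bit_index
          split <;> rfl
        rw [hbodyA, PySem.List.foldl_append_singleton_eq_map,
          PySem.List.foldl_append_singleton_eq_map]
        simp only [List.nil_append]
        congr 1
        exact pv_assemble _ _ _ (fun bi _ => pv_perbit covers hc ((vc - 1 - bi).toNat))
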